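-- pv_equiv track=rewrite | github.com/manvi0308/100DaysOfAlgo | Day 51/RepeatingSubSequence.py | anytwo
-- ===== SOURCE A (Python) =====
-- def anytwo(A):
--
--
--     n=len(A)
--     if n==0:
--         return 0
--
--     x=[[-1]*(n+1) for i in range(n+1)]
--
--     for i in range(n+1):
--         for j in range(n+1):
--             if i==0 or j==0 or i==j:
--                 x[i][j]=0
--             elif A[i-1]==A[j-1]:
--                 x[i][j]=x[i-1][j-1]+1
--             else:
--                 x[i][j]=max(x[i-1][j],x[i][j-1])
--
--             if x[i][j]>=2:
--                 return 1
--
--     return 0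
-- ===== SOURCE B (Python) =====
-- def anytwo(A):
--     first = {}
--     paired = set()
--     pairs = []
--     for i, ch in enumerate(A):
--         if ch in paired:
--             return 1
--         if ch in first:
--             pairs.append((first[ch], i))
--             paired.add(ch)
--         else:
--             first[ch] = i
--     for k in range(len(pairs) - 1):
--         if pairs[k][0] < pairs[k + 1][0]:
--             return 1
--     return 0
-- ===== Notes on version B (the rewrite author's own statement) =====
-- stated objective: faster
-- what changed: Replaces the O(n^2) self-LCS dynamic-programming table (with early exit at value 2) by a single O(n) counting pass: a third occurrence of any character answers 1 immediately, otherwise the (first,second)-occurrence pairs of doubled characters, produced in increasing order of second occurrence, contain a repeating subsequence iff their first components are not strictly decreasing.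
import Mathlib
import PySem

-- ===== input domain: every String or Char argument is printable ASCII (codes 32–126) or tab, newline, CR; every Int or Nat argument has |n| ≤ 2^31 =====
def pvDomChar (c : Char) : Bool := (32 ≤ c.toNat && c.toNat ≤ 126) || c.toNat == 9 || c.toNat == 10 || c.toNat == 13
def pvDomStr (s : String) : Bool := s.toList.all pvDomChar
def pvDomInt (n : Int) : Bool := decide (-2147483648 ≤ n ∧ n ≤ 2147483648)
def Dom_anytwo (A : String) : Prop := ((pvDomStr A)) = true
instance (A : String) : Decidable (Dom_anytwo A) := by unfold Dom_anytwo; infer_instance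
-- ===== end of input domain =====

-- B replaces A's O(n^2) self-LCS DP table (early exit at value 2) by one counting pass:
-- a third occurrence of a character answers 1, else the doubled characters' occurrence
-- pairs (listed by second occurrence) answer 1 iff their first components ever ascend.

-- ===== PORT A =====
-- x[i][j] read / x[i][j]=v on the list-of-lists table; every access A performs is in
-- range (i, j ≤ n on an (n+1)×(n+1) table), so getD/set are exact here.
def pvGetC (x : List (List Int)) (i j : Nat) : Int := (x.getD i []).getD j (-1)
def pvSetC (x : List (List Int)) (i j : Nat) (v : Int) : List (List Int) :=
  x.set i ((x.getD i []).set j v)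

-- the body computing the new x[i][j]; A[i-1] == A[j-1] is s.getD (i-1) ' ' = s.getD (j-1) ' '
-- (exact: the branch is only reached for 1 ≤ i, j ≤ n = len(A))
def anytwoCell (s : List Char) (x : List (List Int)) (i j : Nat) : Int :=
  if i = 0 ∨ j = 0 ∨ i = j then 0
  else if s.getD (i-1) ' ' = s.getD (j-1) ' ' then pvGetC x (i-1) (j-1) + 1
  else max (pvGetC x (i-1) j) (pvGetC x i (j-1))

def anytwoLoopJ (s : List Char) (n i : Nat) (x : List (List Int)) (j : Nat) :
    Sum Int (List (List Int)) :=
  if j ≤ n then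
    let v := anytwoCell s x i j
    let x' := pvSetC x i j v
    if v ≥ 2 then Sum.inl 1 else anytwoLoopJ s n i x' (j+1)
  else Sum.inr x
termination_by n + 1 - j

def anytwoLoopI (s : List Char) (n : Nat) (x : List (List Int)) (i : Nat) : Int :=
  if i ≤ n then
    match anytwoLoopJ s n i x 0 with
    | Sum.inl r => r
    | Sum.inr x' => anytwoLoopI s n x' (i+1)
  else 0
termination_by n + 1 - i

def anytwo (A : String) : Int :=
  let s := A.toList
  let n := s.length
  if n = 0 then 0
  else anytwoLoopI s n (List.replicate (n+1) (List.replicate (n+1) (-1))) 0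

-- ===== PORT B =====
-- the enumerate loop of Source B (first : dict char->index, paired : set, pairs : list);
-- 'return 1' is Sum.inl 1, falling off the loop hands the pairs list on (Sum.inr)
def anytwoAltScan (first : PySem.Dict Char Int) (paired : PySem.Set Char)
    (pairs : List (Int × Int)) : List (Int × Char) → Sum Int (List (Int × Int))
  | [] => Sum.inr pairs
  | (i, ch) :: rest =>
    if PySem.Set.contains paired ch then Sum.inl 1
    else if PySem.Dict.contains first ch then
      anytwoAltScan first (PySem.Set.add paired ch)
        (pairs ++ [(PySem.Dict.getD first ch 0, i)]) rest
    else anytwoAltScan (PySem.Dict.insert first ch i) paired pairs rest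

def anytwoAltAdj : List (Int × Int) → Int
  | p :: q :: rest => if p.1 < q.1 then 1 else anytwoAltAdj (q :: rest)
  | _ => 0

def anytwo_alt (A : String) : Int :=
  match anytwoAltScan PySem.Dict.empty PySem.Set.empty [] (PySem.List.enumerate A.toList 0) with
  | Sum.inl r => r
  | Sum.inr pairs => anytwoAltAdj pairs

-- ===== PRECONDITION & SPEC =====
def Spec_anytwo (A : String) (out : Int) : Prop := out = anytwo_alt A
instance (A : String) (out : Int) : Decidable (Spec_anytwo A out) := by unfold Spec_anytwo; infer_instance

-- ===== CLAIM (what is proved, stated in full; the proofs are below) =====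
def Claim_equal_anytwo : Prop := ∀ (A : String), Dom_anytwo A → Spec_anytwo A (anytwo A)

-- ===== LEMMAS AND PROOFS =====

-- The common characterisation: a repeating subsequence of length ≥ 2 exists iff there are
-- two matched equal-position pairs (a,b), (c,d) with a<b, c<d, a<c, b<d.
def hasRep (s : List Char) : Prop :=
  ∃ a b c d : Nat, a < b ∧ c < d ∧ a < c ∧ b < d ∧ d < s.length ∧
    s.getD a ' ' = s.getD b ' ' ∧ s.getD c ' ' = s.getD d ' '

-- -------- A side: the mathematical DP table Tdp i j = final x[i][j] --------
def Tdp (s : List Char) : Nat → Nat → Int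
  | 0, _ => 0
  | _+1, 0 => 0
  | i+1, j+1 =>
    if i + 1 = j + 1 then 0
    else if s.getD i ' ' = s.getD j ' ' then Tdp s i j + 1
    else max (Tdp s i (j+1)) (Tdp s (i+1) j)
termination_by i j => (i, j)

theorem Tdp_nonneg (s : List Char) : ∀ i j, 0 ≤ Tdp s i j := by
  intro i j
  fun_induction Tdp s i j with
  | case1 => simp
  | case2 => simp
  | case3 i j h => simp
  | case4 i j h1 h2 ih => omega
  | case5 i j h1 h2 ih1 ih2 => omega

theorem Tdp_base (s : List Char) (i j : Nat) (h : i = 0 ∨ j = 0 ∨ i = j) :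
    Tdp s i j = 0 := by
  match i, j with
  | 0, j => rw [Tdp]
  | i+1, 0 => rw [Tdp]
  | i+1, j+1 => rw [Tdp]; have h' : i + 1 = j + 1 := by omega
                simp [h']

theorem Tdp_succ (s : List Char) (i j : Nat) :
    Tdp s (i+1) (j+1) =
      if i + 1 = j + 1 then 0
      else if s.getD i ' ' = s.getD j ' ' then Tdp s i j + 1
      else max (Tdp s i (j+1)) (Tdp s (i+1) j) := by
  rw [Tdp]

theorem Tdp_ge_one (s : List Char) :
    ∀ i j, 1 ≤ Tdp s i j →
      ∃ a b, a ≠ b ∧ a < i ∧ b < j ∧ s.getD a ' ' = s.getD b ' ' := by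
  intro i j
  fun_induction Tdp s i j with
  | case1 => simp
  | case2 => simp
  | case3 i j h => simp
  | case4 i j h1 h2 ih =>
    intro _
    exact ⟨i, j, by omega, by omega, by omega, h2⟩
  | case5 i j h1 h2 ih1 ih2 =>
    intro h
    rcases le_max_iff.mp h with h' | h'
    · obtain ⟨a, b, hab, ha, hb, he⟩ := ih1 h'
      exact ⟨a, b, hab, by omega, hb, he⟩
    · obtain ⟨a, b, hab, ha, hb, he⟩ := ih2 h'
      exact ⟨a, b, hab, ha, by omega, he⟩

theorem Tdp_ge_two (s : List Char) :
    ∀ i j, 2 ≤ Tdp s i j →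
      ∃ a b a' b', a ≠ b ∧ a' ≠ b' ∧ a < a' ∧ b < b' ∧ a' < i ∧ b' < j ∧
        s.getD a ' ' = s.getD b ' ' ∧ s.getD a' ' ' = s.getD b' ' ' := by
  intro i j
  fun_induction Tdp s i j with
  | case1 => simp
  | case2 => simp
  | case3 i j h => simp
  | case4 i j h1 h2 ih =>
    intro h
    have hge : (1:Int) ≤ Tdp s i j := by omega
    have hij : i ≠ j := fun e => h1 (by rw [e])
    obtain ⟨a, b, hab, ha, hb, he⟩ := Tdp_ge_one s i j hge
    exact ⟨a, b, i, j, hab, hij, ha, hb, Nat.lt_succ_self i, Nat.lt_succ_self j, he, h2⟩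
  | case5 i j h1 h2 ih1 ih2 =>
    intro h
    rcases le_max_iff.mp h with h' | h'
    · obtain ⟨a, b, a', b', h3, h4, h5, h6, h7, h8, h9, h10⟩ := ih1 h'
      exact ⟨a, b, a', b', h3, h4, h5, h6, by omega, h8, h9, h10⟩
    · obtain ⟨a, b, a', b', h3, h4, h5, h6, h7, h8, h9, h10⟩ := ih2 h'
      exact ⟨a, b, a', b', h3, h4, h5, h6, h7, by omega, h9, h10⟩

theorem Tdp_step_right (s : List Char) (i j : Nat) (h : 1 ≤ Tdp s i j)
    (hi : i ≠ 0) (hij : i ≠ j + 1) : 1 ≤ Tdp s i (j+1) := by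
  obtain ⟨i', rfl⟩ : ∃ i', i = i' + 1 := ⟨i - 1, by omega⟩
  rw [Tdp_succ]
  simp only [hij, if_false]
  split
  · have := Tdp_nonneg s i' j; omega
  · have := le_max_right (Tdp s i' (j+1)) (Tdp s (i'+1) j); omega

theorem Tdp_step_down (s : List Char) (i j : Nat) (h : 1 ≤ Tdp s i j)
    (hj : j ≠ 0) (hij : i + 1 ≠ j) : 1 ≤ Tdp s (i+1) j := by
  obtain ⟨j', rfl⟩ : ∃ j', j = j' + 1 := ⟨j - 1, by omega⟩
  rw [Tdp_succ]
  simp only [hij, if_false]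
  split
  · have := Tdp_nonneg s i j'; omega
  · have := le_max_left (Tdp s i (j'+1)) (Tdp s (i+1) j'); omega

theorem Tdp_right_many (s : List Char) (i j : Nat) (h : 1 ≤ Tdp s i j)
    (hi : i ≠ 0) (hij : i ≤ j) : ∀ m, 1 ≤ Tdp s i (j+m) := by
  intro m
  induction m with
  | zero => exact h
  | succ m ih => exact Tdp_step_right s i (j+m) ih hi (by omega)

theorem Tdp_down_many (s : List Char) (i j : Nat) (h : 1 ≤ Tdp s i j) :
    ∀ m, i + m < j → 1 ≤ Tdp s (i+m) j := by
  intro m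
  induction m with
  | zero => intro _; exact h
  | succ m ih =>
    intro hm
    have h1 := ih (by omega)
    have h2 := Tdp_step_down s (i+m) j h1 (by omega) (by omega)
    exact h2

theorem two_to_hasRep (s : List Char) (a b a' b' : Nat)
    (hab : a ≠ b) (hab' : a' ≠ b') (h1 : a < a') (h2 : b < b')
    (ha' : a' < s.length) (hb' : b' < s.length)
    (e1 : s.getD a ' ' = s.getD b ' ') (e2 : s.getD a' ' ' = s.getD b' ' ') :
    hasRep s := by
  rcases Nat.lt_or_lt_of_ne hab with hc1 | hc1 <;>
    rcases Nat.lt_or_lt_of_ne hab' with hc2 | hc2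
  · exact ⟨a, b, a', b', hc1, hc2, h1, h2, hb', e1, e2⟩
  · exact ⟨a, b, b', a', hc1, hc2, by omega, by omega, ha', e1, e2.symm⟩
  · exact ⟨b, a, a', b', hc1, hc2, by omega, by omega, hb', e1.symm, e2⟩
  · exact ⟨b, a, b', a', hc1, hc2, h2, h1, ha', e1.symm, e2.symm⟩

theorem hasRep_Tdp (s : List Char) (h : hasRep s) :
    ∃ i j, i < s.length + 1 ∧ j < s.length + 1 ∧ 2 ≤ Tdp s i j := by
  obtain ⟨a, b, c, d, hab, hcd, hac, hbd, hd, e1, e2⟩ := h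
  have hstart : 1 ≤ Tdp s (a+1) (b+1) := by
    have hne : a + 1 ≠ b + 1 := by omega
    rw [Tdp_succ, if_neg hne, if_pos e1]
    have := Tdp_nonneg s a b; omega
  have hrow := Tdp_right_many s (a+1) (b+1) hstart (by omega) (by omega) (d - (b+1))
  rw [show b + 1 + (d - (b+1)) = d from by omega] at hrow
  have hcol := Tdp_down_many s (a+1) d hrow (c - (a+1)) (by omega)
  rw [show a + 1 + (c - (a+1)) = c from by omega] at hcol
  refine ⟨c+1, d+1, by omega, by omega, ?_⟩
  have hne : c + 1 ≠ d + 1 := by omega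
  rw [Tdp_succ, if_neg hne, if_pos e2]
  omega

theorem pvGetD_set_self {α : Type} (l : List α) (n : Nat) (a d : α) (h : n < l.length) :
    (l.set n a).getD n d = a := by
  rw [List.getD_eq_getElem?_getD, List.getElem?_set_self (by simpa using h), Option.getD_some]

theorem pvGetD_set_ne {α : Type} (l : List α) (n m : Nat) (a : α) (d : α) (h : n ≠ m) :
    (l.set n a).getD m d = l.getD m d := by
  rw [List.getD_eq_getElem?_getD, List.getD_eq_getElem?_getD, List.getElem?_set_ne h]

theorem pvGetD_getElem {α : Type} (l : List α) (n : Nat) (d : α) (h : n < l.length) :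
    l.getD n d = l[n] := by
  rw [List.getD_eq_getElem?_getD, List.getElem?_eq_getElem h, Option.getD_some]

def TblShape (n : Nat) (x : List (List Int)) : Prop :=
  x.length = n + 1 ∧ ∀ k, (h : k < x.length) → x[k].length = n + 1

theorem shape_set (n : Nat) (x : List (List Int)) (i j : Nat) (v : Int)
    (h : TblShape n x) : TblShape n (pvSetC x i j v) := by
  obtain ⟨h1, h2⟩ := h
  refine ⟨by simp [pvSetC, h1], ?_⟩
  intro k hk
  have hk' : k < x.length := by simpa [pvSetC] using hk
  simp only [pvSetC, List.getElem_set]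
  split
  · next hik =>
      rw [List.length_set, pvGetD_getElem _ _ _ (hik ▸ hk')]
      exact hik ▸ h2 k hk'
  · exact h2 k hk'

theorem getC_setC_same (n : Nat) (x : List (List Int)) (i j : Nat) (v : Int)
    (h : TblShape n x) (hi : i ≤ n) (hj : j ≤ n) :
    pvGetC (pvSetC x i j v) i j = v := by
  obtain ⟨h1, h2⟩ := h
  have hi' : i < x.length := by omega
  have hrow : (x.getD i []).length = n + 1 := by
    rw [pvGetD_getElem _ _ _ hi']; exact h2 i hi'
  show ((x.set i ((x.getD i []).set j v)).getD i []).getD j (-1) = v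
  rw [pvGetD_set_self _ _ _ _ hi']
  rw [pvGetD_set_self _ _ _ _ (by omega)]

theorem getC_setC_ne (x : List (List Int)) (i j i' j' : Nat) (v : Int)
    (h : i ≠ i' ∨ j ≠ j') : pvGetC (pvSetC x i j v) i' j' = pvGetC x i' j' := by
  show ((x.set i ((x.getD i []).set j v)).getD i' []).getD j' (-1) =
    (x.getD i' []).getD j' (-1)
  by_cases hii : i = i'
  · subst hii
    have hjj : j ≠ j' := by tauto
    by_cases hlt : i < x.length
    · rw [pvGetD_set_self _ _ _ _ hlt, pvGetD_set_ne _ _ _ _ _ hjj]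
    · rw [List.set_eq_of_length_le (by omega)]
  · rw [pvGetD_set_ne _ _ _ _ _ hii]

def RowsBelow (s : List Char) (n : Nat) (x : List (List Int)) (i : Nat) : Prop :=
  ∀ i' j', i' < i → i' ≤ n → j' ≤ n → pvGetC x i' j' = Tdp s i' j'

def RowPrefix (s : List Char) (n : Nat) (x : List (List Int)) (i j : Nat) : Prop :=
  ∀ j', j' < j → j' ≤ n → pvGetC x i j' = Tdp s i j'

theorem cell_correct (s : List Char) (n : Nat) (x : List (List Int)) (i j : Nat)
    (hrb : RowsBelow s n x i) (hrp : RowPrefix s n x i j) (hi : i ≤ n) (hj : j ≤ n) :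
    anytwoCell s x i j = Tdp s i j := by
  unfold anytwoCell
  by_cases hbase : i = 0 ∨ j = 0 ∨ i = j
  · rw [if_pos hbase, Tdp_base s i j hbase]
  · rw [if_neg hbase]
    push_neg at hbase
    obtain ⟨hi0, hj0, hij⟩ := hbase
    obtain ⟨i', rfl⟩ : ∃ i', i = i' + 1 := ⟨i - 1, by omega⟩
    obtain ⟨j', rfl⟩ : ∃ j', j = j' + 1 := ⟨j - 1, by omega⟩
    rw [Tdp_succ, if_neg hij]
    simp only [Nat.add_sub_cancel]
    rw [hrb i' j' (by omega) (by omega) (by omega),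
      hrb i' (j'+1) (by omega) (by omega) (by omega),
      hrp j' (by omega) (by omega)]

theorem loopJ_exit (s : List Char) (n i j : Nat) (x : List (List Int)) (hi : i ≤ n)
    (hj : ¬ j ≤ n) (hsh : TblShape n x) (hrb : RowsBelow s n x i)
    (hrp : RowPrefix s n x i j) :
    (∀ j', j ≤ j' → j' ≤ n → Tdp s i j' < 2) ∧
      ∃ x', anytwoLoopJ s n i x j = Sum.inr x' ∧ TblShape n x' ∧
        RowsBelow s n x' (i+1) := by
  refine ⟨fun j' h1 h2 => absurd h2 (by omega), x, ?_, hsh, ?_⟩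
  · rw [anytwoLoopJ, if_neg hj]
  · intro i' j' hlt hi' hj'
    rcases Nat.lt_succ_iff_lt_or_eq.mp hlt with h | h
    · exact hrb i' j' h hi' hj'
    · subst h; exact hrp j' (by omega) hj'

theorem loopJ_spec (s : List Char) (n i : Nat) (hi : i ≤ n) :
    ∀ k j x, n + 1 - j ≤ k → TblShape n x → RowsBelow s n x i → RowPrefix s n x i j →
      (∃ j', j ≤ j' ∧ j' ≤ n ∧ 2 ≤ Tdp s i j' ∧ anytwoLoopJ s n i x j = Sum.inl 1)
      ∨ ((∀ j', j ≤ j' → j' ≤ n → Tdp s i j' < 2) ∧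
          ∃ x', anytwoLoopJ s n i x j = Sum.inr x' ∧ TblShape n x' ∧
            RowsBelow s n x' (i+1)) := by
  intro k
  induction k with
  | zero =>
    intro j x hk hsh hrb hrp
    exact Or.inr (loopJ_exit s n i j x hi (by omega) hsh hrb hrp)
  | succ k ih =>
    intro j x hk hsh hrb hrp
    by_cases hj : j ≤ n
    · have hcell : anytwoCell s x i j = Tdp s i j := cell_correct s n x i j hrb hrp hi hj
      by_cases hv : anytwoCell s x i j ≥ 2
      · refine Or.inl ⟨j, le_refl j, hj, by omega, ?_⟩
        rw [anytwoLoopJ, if_pos hj]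
        simp only [if_pos hv]
      · have hsh' := shape_set n x i j (anytwoCell s x i j) hsh
        have hrb' : RowsBelow s n (pvSetC x i j (anytwoCell s x i j)) i := by
          intro i' j' h1 h2 h3
          rw [getC_setC_ne x i j i' j' _ (Or.inl (by omega))]
          exact hrb i' j' h1 h2 h3
        have hrp' : RowPrefix s n (pvSetC x i j (anytwoCell s x i j)) i (j+1) := by
          intro j' h1 h2
          rcases Nat.lt_succ_iff_lt_or_eq.mp h1 with h | h
          · rw [getC_setC_ne x i j i j' _ (Or.inr (by omega))]
            exact hrp j' h h2
          · rw [h, getC_setC_same n x i j _ hsh hi hj, hcell]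
        have hstep : anytwoLoopJ s n i x j =
            anytwoLoopJ s n i (pvSetC x i j (anytwoCell s x i j)) (j+1) := by
          rw [anytwoLoopJ, if_pos hj]
          simp only [if_neg hv]
        rcases ih (j+1) _ (by omega) hsh' hrb' hrp' with ⟨j', h1, h2, h3, h4⟩ | ⟨hall, x', h1, h2, h3⟩
        · exact Or.inl ⟨j', by omega, h2, h3, by rw [hstep]; exact h4⟩
        · refine Or.inr ⟨?_, x', by rw [hstep]; exact h1, h2, h3⟩
          intro j' hj1 hj2
          rcases Nat.eq_or_lt_of_le hj1 with h | h
          · subst h; omega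
          · exact hall j' (by omega) hj2
    · exact Or.inr (loopJ_exit s n i j x hi hj hsh hrb hrp)

theorem loopI_spec (s : List Char) (n : Nat) :
    ∀ k i x, n + 1 - i ≤ k → TblShape n x → RowsBelow s n x i →
      ((∃ i' j', i ≤ i' ∧ i' ≤ n ∧ j' ≤ n ∧ 2 ≤ Tdp s i' j') →
          anytwoLoopI s n x i = 1)
      ∧ ((∀ i' j', i ≤ i' → i' ≤ n → j' ≤ n → Tdp s i' j' < 2) →
          anytwoLoopI s n x i = 0) := by
  intro k
  induction k with
  | zero =>
    intro i x hk hsh hrb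
    constructor
    · rintro ⟨i', j', h1, h2, h3, h4⟩; omega
    · intro _; rw [anytwoLoopI, if_neg (by omega)]
  | succ k ih =>
    intro i x hk hsh hrb
    by_cases hi : i ≤ n
    · have hrp0 : RowPrefix s n x i 0 := fun j' h _ => absurd h (by omega)
      rcases loopJ_spec s n i hi (n+1) 0 x (by omega) hsh hrb hrp0 with
        ⟨j', _, hj', h2, hres⟩ | ⟨hrow, x', hres, hsh', hrb'⟩
      · have hval : anytwoLoopI s n x i = 1 := by
          rw [anytwoLoopI, if_pos hi, hres]
        constructor
        · intro _; exact hval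
        · intro hall
          exact absurd h2 (by have := hall i j' (le_refl i) hi hj'; omega)
      · have hval : anytwoLoopI s n x i = anytwoLoopI s n x' (i+1) := by
          rw [anytwoLoopI, if_pos hi, hres]
        obtain ⟨ih1, ih2⟩ := ih (i+1) x' (by omega) hsh' hrb'
        constructor
        · rintro ⟨i', j', h1, h2, h3, h4⟩
          rcases Nat.eq_or_lt_of_le h1 with h | h
          · subst h
            exact absurd h4 (by have := hrow j' (by omega) h3; omega)
          · rw [hval]; exact ih1 ⟨i', j', by omega, h2, h3, h4⟩
        · intro hall
          rw [hval]
          exact ih2 (fun i' j' h1 h2 h3 => hall i' j' (by omega) h2 h3)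
    · constructor
      · rintro ⟨i', j', h1, h2, h3, h4⟩; omega
      · intro _; rw [anytwoLoopI, if_neg hi]

theorem anytwo_characterisation (A : String) :
    (hasRep A.toList → anytwo A = 1) ∧ (¬ hasRep A.toList → anytwo A = 0) := by
  unfold anytwo
  simp only []
  by_cases hn : A.toList.length = 0
  · rw [if_pos hn]
    constructor
    · intro h
      obtain ⟨a, b, c, d, _, _, _, _, hd, _, _⟩ := h
      omega
    · intro _; rfl
  · rw [if_neg hn]
    have hsh : TblShape A.toList.length
        (List.replicate (A.toList.length+1) (List.replicate (A.toList.length+1) (-1 : Int))) := by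
      refine ⟨List.length_replicate, fun k h => ?_⟩
      rw [List.getElem_replicate]
      exact List.length_replicate
    have hrb0 : RowsBelow A.toList A.toList.length
        (List.replicate (A.toList.length+1) (List.replicate (A.toList.length+1) (-1 : Int))) 0 :=
      fun i' j' h _ _ => absurd h (by omega)
    obtain ⟨L1, L2⟩ := loopI_spec A.toList A.toList.length (A.toList.length+1) 0 _
      (by omega) hsh hrb0
    constructor
    · intro h
      obtain ⟨i, j, hi, hj, h2⟩ := hasRep_Tdp A.toList h
      exact L1 ⟨i, j, Nat.zero_le i, by omega, by omega, h2⟩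
    · intro h
      refine L2 (fun i' j' _ hi' hj' => ?_)
      by_contra hc
      obtain ⟨a, b, a', b', h3, h4, h5, h6, h7, h8, h9, h10⟩ :=
        Tdp_ge_two A.toList i' j' (by omega)
      exact h (two_to_hasRep A.toList a b a' b' h3 h4 h5 h6 (by omega) (by omega) h9 h10)

-- -------- B side --------
def pairsSpec (p : List Char) : List (Int × Int) :=
  (List.range p.length).filterMap fun k =>
    if (p.take (k+1)).count (p.getD k ' ') = 2
    then some ((p.idxOf (p.getD k ' ') : Int), (k : Int)) else none

-- ---------- counting helpers ----------
theorem pv_one_position (s : List Char) (c : Char) (h : 1 ≤ s.count c) :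
    ∃ p, p < s.length ∧ s.getD p ' ' = c := by
  have hm : c ∈ s := List.count_pos_iff.mp (by omega)
  obtain ⟨p, hp, he⟩ := List.mem_iff_getElem.mp hm
  exact ⟨p, hp, by rw [List.getD_eq_getElem?_getD, List.getElem?_eq_getElem hp]; simpa using he⟩

theorem pv_two_positions (s : List Char) (c : Char) :
    2 ≤ s.count c → ∃ p q, p < q ∧ q < s.length ∧ s.getD p ' ' = c ∧ s.getD q ' ' = c := by
  induction s with
  | nil => simp
  | cons x t ih =>
    intro h
    rw [List.count_cons] at h
    by_cases hx : x = c
    · have h1 : 1 ≤ t.count c := by rw [if_pos (beq_iff_eq.mpr hx)] at h; omega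
      obtain ⟨q, hq, he⟩ := pv_one_position t c h1
      exact ⟨0, q+1, by omega, by simp; omega, by simpa using hx, by simpa using he⟩
    · have h2 : 2 ≤ t.count c := by rw [if_neg (by simp [hx])] at h; omega
      obtain ⟨p, q, h1, h2', h3, h4⟩ := ih h2
      exact ⟨p+1, q+1, by omega, by simp; omega, by simpa using h3, by simpa using h4⟩

theorem pv_three_positions (s : List Char) (c : Char) :
    3 ≤ s.count c → ∃ p q r, p < q ∧ q < r ∧ r < s.length ∧
      s.getD p ' ' = c ∧ s.getD q ' ' = c ∧ s.getD r ' ' = c := by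
  induction s with
  | nil => simp
  | cons x t ih =>
    intro h
    rw [List.count_cons] at h
    by_cases hx : x = c
    · have h1 : 2 ≤ t.count c := by rw [if_pos (beq_iff_eq.mpr hx)] at h; omega
      obtain ⟨p, q, h1', h2, h3, h4⟩ := pv_two_positions t c h1
      exact ⟨0, p+1, q+1, by omega, by omega, by simp; omega,
        by simpa using hx, by simpa using h3, by simpa using h4⟩
    · have h2 : 3 ≤ t.count c := by rw [if_neg (by simp [hx])] at h; omega
      obtain ⟨p, q, r, h1', h2', h3, h4, h5, h6⟩ := ih h2
      exact ⟨p+1, q+1, r+1, by omega, by omega, by simp; omega,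
        by simpa using h4, by simpa using h5, by simpa using h6⟩

theorem pv_count_ge_two (s : List Char) (c : Char) :
    ∀ a b : Nat, a < b → b < s.length → s.getD a ' ' = c → s.getD b ' ' = c →
      2 ≤ s.count c := by
  induction s with
  | nil => intro a b _ h; simp at h
  | cons x t ih =>
    intro a b hab hb e1 e2
    rw [List.count_cons]
    match a, b with
    | 0, b'+1 =>
      have hx : x = c := by simpa using e1
      have hmem : c ∈ t := by
        have : t.getD b' ' ' = c := by simpa using e2
        have hb' : b' < t.length := by simpa using hb
        rw [List.getD_eq_getElem?_getD, List.getElem?_eq_getElem hb'] at this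
        simp at this
        exact this ▸ List.getElem_mem hb'
      have := List.count_pos_iff.mpr hmem
      rw [if_pos (beq_iff_eq.mpr hx)]; omega
    | a'+1, b'+1 =>
      have := ih a' b' (by omega) (by simpa using hb) (by simpa using e1) (by simpa using e2)
      omega

theorem pv_count_ge_three (s : List Char) (c : Char) :
    ∀ a b d : Nat, a < b → b < d → d < s.length → s.getD a ' ' = c → s.getD b ' ' = c →
      s.getD d ' ' = c → 3 ≤ s.count c := by
  induction s with
  | nil => intro a b d _ _ h; simp at h
  | cons x t ih =>
    intro a b d hab hbd hd e1 e2 e3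
    rw [List.count_cons]
    match a, b, d with
    | 0, b'+1, d'+1 =>
      have hx : x = c := by simpa using e1
      have := pv_count_ge_two t c b' d' (by omega) (by simpa using hd)
        (by simpa using e2) (by simpa using e3)
      rw [if_pos (beq_iff_eq.mpr hx)]; omega
    | a'+1, b'+1, d'+1 =>
      have := ih a' b' d' (by omega) (by omega) (by simpa using hd)
        (by simpa using e1) (by simpa using e2) (by simpa using e3)
      omega

theorem pv_getD_idxOf (s : List Char) (c : Char) (h : c ∈ s) :
    s.getD (s.idxOf c) ' ' = c := by
  have hlt : s.idxOf c < s.length := List.idxOf_lt_length_iff.mpr h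
  rw [List.getD_eq_getElem?_getD, List.getElem?_eq_getElem hlt]
  simpa using List.getElem_idxOf hlt

theorem pv_idxOf_le (s : List Char) (c : Char) :
    ∀ a : Nat, a < s.length → s.getD a ' ' = c → s.idxOf c ≤ a := by
  induction s with
  | nil => intro a h; simp at h
  | cons x t ih =>
    intro a ha e
    match a with
    | 0 =>
      have hx : x = c := by simpa using e
      simp [List.idxOf_cons, hx]
    | a'+1 =>
      by_cases hx : x = c
      · simp [List.idxOf_cons, hx]
      · have := ih a' (by simpa using ha) (by simpa using e)
        simp [hx]
        omega

-- ---------- pairsSpec lemmas ----------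
theorem mem_pairsSpec (s : List Char) (pr : Int × Int) :
    pr ∈ pairsSpec s ↔ ∃ k : Nat, k < s.length ∧
      (s.take (k+1)).count (s.getD k ' ') = 2 ∧
      pr = ((s.idxOf (s.getD k ' ') : Int), (k : Int)) := by
  simp only [pairsSpec, List.mem_filterMap, List.mem_range]
  constructor
  · rintro ⟨k, hk, hf⟩
    split at hf
    · exact ⟨k, hk, by assumption, by simpa using hf.symm⟩
    · simp at hf
  · rintro ⟨k, hk, hc, rfl⟩
    exact ⟨k, hk, by rw [if_pos hc]⟩

theorem pairsSpec_sec_pairwise (s : List Char) :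
    (pairsSpec s).Pairwise (fun p q => p.2 < q.2) := by
  unfold pairsSpec
  rw [List.pairwise_filterMap]
  apply List.Pairwise.imp ?_ (List.pairwise_lt_range (n := s.length))
  intro a b hab x hx y hy
  split at hx <;> simp at hx
  split at hy <;> simp at hy
  rw [← hx, ← hy]
  simpa using hab

theorem pairsSpec_snoc (p : List Char) (c : Char) :
    pairsSpec (p ++ [c]) = pairsSpec p ++
      (if p.count c = 1 then [((p.idxOf c : Int), (p.length : Int))] else []) := by
  unfold pairsSpec
  rw [List.length_append, List.length_cons, List.length_nil, Nat.zero_add,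
    List.range_succ, List.filterMap_append]
  congr 1
  · apply List.filterMap_congr
    intro k hk
    have hk' : k < p.length := List.mem_range.mp hk
    have hgd : (p ++ [c]).getD k ' ' = p.getD k ' ' := List.getD_append p [c] ' ' k hk'
    have htk : (p ++ [c]).take (k+1) = p.take (k+1) := List.take_append_of_le_length (by omega)
    rw [hgd, htk]
    split
    · next hcnt =>
      have hmem : p.getD k ' ' ∈ p :=
        (List.take_sublist (k+1) p).mem (List.count_pos_iff.mp (by omega))
      rw [List.idxOf_append, if_pos hmem]
    · rfl
  · have hgd : (p ++ [c]).getD p.length ' ' = c := by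
      rw [List.getD_eq_getElem?_getD, List.getElem?_eq_getElem (by simp)]
      simp
    have htk : (p ++ [c]).take (p.length + 1) = p ++ [c] :=
      List.take_of_length_le (by simp)
    simp only [List.filterMap_cons, List.filterMap_nil, hgd, htk]
    rw [List.count_append]
    simp only [List.count_cons, List.count_nil]
    by_cases hc1 : p.count c = 1
    · rw [if_pos (by simp [hc1]), if_pos hc1]
      have hmem : c ∈ p := List.count_pos_iff.mp (by omega)
      rw [List.idxOf_append, if_pos hmem]
    · rw [if_neg (by simp; omega), if_neg hc1]

theorem pairsSpec_mem_of (s : List Char) (c : Char) (a b : Nat)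
    (hab : a < b) (hb : b < s.length) (e1 : s.getD a ' ' = c) (e2 : s.getD b ' ' = c)
    (hc2 : s.count c = 2) :
    ((a : Int), (b : Int)) ∈ pairsSpec s := by
  have hidx : s.idxOf c = a := by
    have h1 : s.idxOf c ≤ a := pv_idxOf_le s c a (by omega) e1
    rcases Nat.eq_or_lt_of_le h1 with h | h
    · exact h
    · exfalso
      have hmem : c ∈ s := List.count_pos_iff.mp (by omega)
      have := pv_count_ge_three s c (s.idxOf c) a b h hab hb (pv_getD_idxOf s c hmem) e1 e2
      omega
  rw [mem_pairsSpec]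
  refine ⟨b, hb, ?_, by rw [e2, hidx]⟩
  have hlen : (s.take (b+1)).length = b + 1 := by
    rw [List.length_take]; omega
  have hga : (s.take (b+1)).getD a ' ' = c := by
    rw [List.getD_eq_getElem?_getD, List.getElem?_eq_getElem (by omega)]
    rw [List.getElem_take]
    rw [List.getD_eq_getElem?_getD, List.getElem?_eq_getElem (by omega)] at e1
    simpa using e1
  have hgb : (s.take (b+1)).getD b ' ' = c := by
    rw [List.getD_eq_getElem?_getD, List.getElem?_eq_getElem (by omega)]
    rw [List.getElem_take]
    rw [List.getD_eq_getElem?_getD, List.getElem?_eq_getElem (by omega)] at e2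
    simpa using e2
  have hge : 2 ≤ (s.take (b+1)).count c :=
    pv_count_ge_two _ c a b hab (by omega) hga hgb
  have hle' : (s.take (b+1)).count c ≤ 2 := hc2 ▸ (List.take_sublist (b+1) s).count_le c
  rw [e2]; omega

theorem take_count_two_idxOf (s : List Char) (k : Nat) (hk : k < s.length)
    (h : (s.take (k+1)).count (s.getD k ' ') = 2) :
    s.idxOf (s.getD k ' ') < k ∧ s.getD (s.idxOf (s.getD k ' ')) ' ' = s.getD k ' ' := by
  obtain ⟨p, q, hpq, hq, ep, eq⟩ := pv_two_positions (s.take (k+1)) (s.getD k ' ') (by omega)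
  have hlen : (s.take (k+1)).length ≤ k + 1 := by rw [List.length_take]; omega
  have hp' : p < s.length := by omega
  have hep : s.getD p ' ' = s.getD k ' ' := by
    rw [List.getD_eq_getElem?_getD, List.getElem?_eq_getElem (by omega : p < (s.take (k+1)).length)] at ep
    rw [List.getElem_take] at ep
    rw [List.getD_eq_getElem?_getD, List.getElem?_eq_getElem hp']
    simpa using ep
  have hmem : s.getD k ' ' ∈ s := by
    rw [← hep]
    rw [List.getD_eq_getElem?_getD, List.getElem?_eq_getElem hp']
    exact List.getElem_mem hp'
  constructor
  · have h1 : s.idxOf (s.getD k ' ') ≤ p := pv_idxOf_le s _ p hp' hep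
    omega
  · exact pv_getD_idxOf s _ hmem

-- ---------- the adjacent-scan lemmas ----------
theorem adj_zero_or_one (L : List (Int × Int)) :
    anytwoAltAdj L = 0 ∨ anytwoAltAdj L = 1 := by
  induction L with
  | nil => left; rfl
  | cons p rest ih =>
    match rest with
    | [] => left; rfl
    | q :: rest' =>
      rw [anytwoAltAdj]
      split
      · right; rfl
      · exact ih

theorem adj_one (L : List (Int × Int)) (h : anytwoAltAdj L = 1) :
    ∃ l1 x y l2, L = l1 ++ x :: y :: l2 ∧ x.1 < y.1 := by
  induction L with
  | nil => simp [anytwoAltAdj] at h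
  | cons p rest ih =>
    match rest with
    | [] => simp [anytwoAltAdj] at h
    | q :: rest' =>
      rw [anytwoAltAdj] at h
      split at h
      · exact ⟨[], p, q, rest', rfl, by assumption⟩
      · obtain ⟨l1, x, y, l2, he, hlt⟩ := ih h
        exact ⟨p :: l1, x, y, l2, by rw [he, List.cons_append], hlt⟩

theorem adj_zero_pairwise (L : List (Int × Int)) (h : anytwoAltAdj L = 0) :
    L.Pairwise (fun p q => q.1 ≤ p.1) := by
  induction L with
  | nil => exact List.Pairwise.nil
  | cons p rest ih =>
    match rest with
    | [] => simp
    | q :: rest' =>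
      rw [anytwoAltAdj] at h
      split at h
      · simp at h
      · next hnlt =>
        have ihp := ih h
        refine List.pairwise_cons.mpr ⟨?_, ihp⟩
        intro r hr
        rcases List.mem_cons.mp hr with rfl | hr'
        · omega
        · have := (List.pairwise_cons.mp ihp).1 r hr'
          omega

theorem adj_char (s : List Char) (hle : ∀ ch, s.count ch ≤ 2) :
    (hasRep s → anytwoAltAdj (pairsSpec s) = 1) ∧
      (¬ hasRep s → anytwoAltAdj (pairsSpec s) = 0) := by
  rcases adj_zero_or_one (pairsSpec s) with h0 | h1
  · have hnr : ¬ hasRep s := by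
      rintro ⟨a, b, c, d, hab, hcd, hac, hbd, hd, e1, e2⟩
      have hbl : b < s.length := by omega
      have hca : 2 ≤ s.count (s.getD a ' ') :=
        pv_count_ge_two s _ a b hab hbl rfl e1.symm
      have hcc : 2 ≤ s.count (s.getD c ' ') :=
        pv_count_ge_two s _ c d hcd hd rfl e2.symm
      have hcae : s.count (s.getD a ' ') = 2 := le_antisymm (hle _) hca
      have hcce : s.count (s.getD c ' ') = 2 := le_antisymm (hle _) hcc
      have hne : s.getD a ' ' ≠ s.getD c ' ' := by
        intro he
        have := pv_count_ge_three s (s.getD a ' ') a c d hac hcd hd rfl he.symm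
          (by rw [← e2, ← he])
        have := hle (s.getD a ' '); omega
      have hx : ((a : Int), (b : Int)) ∈ pairsSpec s :=
        pairsSpec_mem_of s _ a b hab hbl rfl e1.symm hcae
      have hy : ((c : Int), (d : Int)) ∈ pairsSpec s :=
        pairsSpec_mem_of s _ c d hcd hd rfl e2.symm hcce
      obtain ⟨k1, hk1, he1⟩ := List.mem_iff_getElem.mp hx
      obtain ⟨k2, hk2, he2⟩ := List.mem_iff_getElem.mp hy
      have hsec := List.pairwise_iff_getElem.mp (pairsSpec_sec_pairwise s)
      have hge := List.pairwise_iff_getElem.mp (adj_zero_pairwise _ h0)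
      have hk12 : k1 < k2 := by
        rcases Nat.lt_trichotomy k1 k2 with h | h | h
        · exact h
        · exfalso
          subst h
          have heq := he1.symm.trans he2
          have : (b : Int) = (d : Int) := congrArg Prod.snd heq
          omega
        · exfalso
          have := hsec k2 k1 hk2 hk1 h
          rw [he1, he2] at this
          simp at this; omega
      have := hge k1 k2 hk1 hk2 hk12
      rw [he1, he2] at this
      simp at this; omega
    exact ⟨fun h => absurd h hnr, fun _ => h0⟩
  · have hr : hasRep s := by
      obtain ⟨l1, x, y, l2, he, hlt⟩ := adj_one _ h1
      have hx : x ∈ pairsSpec s := by rw [he]; simp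
      have hy : y ∈ pairsSpec s := by rw [he]; simp
      have hsec : x.2 < y.2 := by
        have hp := pairsSpec_sec_pairwise s
        rw [he] at hp
        have := (hp.sublist (List.sublist_append_right l1 _))
        exact (List.pairwise_cons.mp this).1 y (List.mem_cons_self)
      obtain ⟨k1, hk1, hcnt1, hxe⟩ := (mem_pairsSpec s x).mp hx
      obtain ⟨k2, hk2, hcnt2, hye⟩ := (mem_pairsSpec s y).mp hy
      obtain ⟨hi1, hei1⟩ := take_count_two_idxOf s k1 hk1 hcnt1
      obtain ⟨hi2, hei2⟩ := take_count_two_idxOf s k2 hk2 hcnt2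
      rw [hxe, hye] at hlt hsec
      simp at hlt hsec
      exact ⟨s.idxOf (s.getD k1 ' '), k1, s.idxOf (s.getD k2 ' '), k2,
        hi1, hi2, by exact_mod_cast hlt, by exact_mod_cast hsec, hk2, hei1, hei2⟩
    exact ⟨fun _ => h1, fun h => absurd hr h⟩

theorem scan_spec (s : List Char) :
    ∀ (q p : List Char) (first : PySem.Dict Char Int) (paired : PySem.Set Char)
      (pairs : List (Int × Int)), s = p ++ q →
      (∀ c : Char, PySem.Dict.get? first c =
        if c ∈ p then some ((p.idxOf c : Int)) else none) →
      (∀ c : Char, PySem.Set.contains paired c = true ↔ p.count c = 2) →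
      (∀ c : Char, p.count c ≤ 2) →
      pairs = pairsSpec p →
      ((∃ c, 3 ≤ s.count c) ∧
          anytwoAltScan first paired pairs (PySem.List.enumerate q (p.length : Int)) =
            Sum.inl 1)
      ∨ ((∀ c, s.count c ≤ 2) ∧
          anytwoAltScan first paired pairs (PySem.List.enumerate q (p.length : Int)) =
            Sum.inr (pairsSpec s)) := by
  intro q
  induction q with
  | nil =>
    intro p first paired pairs hs hF hP hle hpairs
    rw [List.append_nil] at hs
    subst hs
    right
    exact ⟨hle, by simp [PySem.List.enumerate, anytwoAltScan, hpairs]⟩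
  | cons c q' ih =>
    intro p first paired pairs hs hF hP hle hpairs
    rw [PySem.List.enumerate_cons, anytwoAltScan]
    by_cases hp2 : p.count c = 2
    · rw [if_pos ((hP c).mpr hp2)]
      left
      refine ⟨⟨c, ?_⟩, rfl⟩
      rw [hs, List.count_append, List.count_cons]
      simp; omega
    · have hPc : ¬ (PySem.Set.contains paired c = true) := fun h => hp2 ((hP c).mp h)
      rw [if_neg hPc]
      by_cases hmem : c ∈ p
      · have hC : PySem.Dict.contains first c = true := by
          rw [PySem.Dict.contains_eq_isSome_get?, hF c, if_pos hmem]; rfl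
        rw [if_pos hC]
        have hcnt1 : p.count c = 1 := by
          have := List.count_pos_iff.mpr hmem
          have := hle c; omega
        have hgd : PySem.Dict.getD first c 0 = (p.idxOf c : Int) := by
          rw [PySem.Dict.getD_eq_get?_getD, hF c, if_pos hmem]; rfl
        have hs' : s = (p ++ [c]) ++ q' := by rw [hs]; simp
        have hF' : ∀ ch : Char, PySem.Dict.get? first ch =
            if ch ∈ p ++ [c] then some (((p ++ [c]).idxOf ch : Int)) else none := by
          intro ch
          rw [hF ch]
          by_cases hch : ch ∈ p
          · rw [if_pos hch, if_pos (by simp [hch]), List.idxOf_append, if_pos hch]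
          · by_cases hcc : ch = c
            · subst hcc; exact absurd hmem hch
            · rw [if_neg hch, if_neg (by simp [hch, hcc])]
        have hP' : ∀ ch : Char, PySem.Set.contains (PySem.Set.add paired c) ch = true ↔
            (p ++ [c]).count ch = 2 := by
          intro ch
          rw [PySem.Set.contains_iff, PySem.Set.mem_add, List.count_append,
            List.count_cons]
          by_cases hcc : ch = c
          · subst hcc
            simp only [List.count_nil]
            constructor
            · intro _; simp [hcnt1]
            · intro _; simp
          · simp only [List.count_nil]
            rw [← PySem.Set.contains_iff, hP ch]
            constructor
            · rintro (h | h)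
              · simp [Ne.symm hcc]; omega
              · exact absurd h hcc
            · intro h
              left
              simp [Ne.symm hcc] at h
              omega
        have hle2 : ∀ ch : Char, (p ++ [c]).count ch ≤ 2 := by
          intro ch
          rw [List.count_append, List.count_cons]
          by_cases hcc : c = ch
          · subst hcc; simp [hcnt1]
          · have := hle ch; simp [hcc]; omega
        have hpairs' : pairs ++ [(PySem.Dict.getD first c 0, (p.length : Int))] =
            pairsSpec (p ++ [c]) := by
          rw [pairsSpec_snoc, if_pos hcnt1, hpairs, hgd]
        have hlen' : ((p ++ [c]).length : Int) = (p.length : Int) + 1 := by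
          simp
        have := ih (p ++ [c]) first (PySem.Set.add paired c)
          (pairs ++ [(PySem.Dict.getD first c 0, (p.length : Int))]) hs' hF' hP' hle2 hpairs'
        rw [hlen'] at this
        exact this
      · have hC : ¬ (PySem.Dict.contains first c = true) := by
          rw [PySem.Dict.contains_eq_isSome_get?, hF c, if_neg hmem]; simp
        rw [if_neg hC]
        have hcnt0 : p.count c = 0 := List.count_eq_zero_of_not_mem hmem
        have hs' : s = (p ++ [c]) ++ q' := by rw [hs]; simp
        have hF' : ∀ ch : Char, PySem.Dict.get? (PySem.Dict.insert first c (p.length : Int)) ch =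
            if ch ∈ p ++ [c] then some (((p ++ [c]).idxOf ch : Int)) else none := by
          intro ch
          rw [PySem.Dict.get?_insert, hF ch]
          by_cases hcc : ch = c
          · subst hcc
            rw [if_pos rfl, if_pos (by simp)]
            rw [List.idxOf_append, if_neg hmem]
            simp
          · rw [if_neg hcc]
            by_cases hch : ch ∈ p
            · rw [if_pos hch, if_pos (by simp [hch]), List.idxOf_append, if_pos hch]
            · rw [if_neg hch, if_neg (by simp [hch, hcc])]
        have hP' : ∀ ch : Char, PySem.Set.contains paired ch = true ↔
            (p ++ [c]).count ch = 2 := by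
          intro ch
          rw [hP ch, List.count_append, List.count_cons]
          by_cases hcc : ch = c
          · subst hcc
            simp only [List.count_nil]
            simp [hcnt0]
          · simp [Ne.symm hcc]
        have hle2 : ∀ ch : Char, (p ++ [c]).count ch ≤ 2 := by
          intro ch
          rw [List.count_append, List.count_cons]
          by_cases hcc : c = ch
          · subst hcc; simp [hcnt0]
          · have := hle ch; simp [hcc]; omega
        have hpairs' : pairs = pairsSpec (p ++ [c]) := by
          rw [pairsSpec_snoc, if_neg (by omega), hpairs, List.append_nil]
        have hlen' : ((p ++ [c]).length : Int) = (p.length : Int) + 1 := by simp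
        have := ih (p ++ [c]) (PySem.Dict.insert first c (p.length : Int)) paired
          pairs hs' hF' hP' hle2 hpairs'
        rw [hlen'] at this
        exact this

theorem anytwo_alt_characterisation (A : String) :
    (hasRep A.toList → anytwo_alt A = 1) ∧ (¬ hasRep A.toList → anytwo_alt A = 0) := by
  unfold anytwo_alt
  have h0 : (0 : Int) = ((([] : List Char).length : Int)) := by simp
  rw [h0]
  have h := scan_spec A.toList A.toList [] PySem.Dict.empty PySem.Set.empty []
    (by simp) (fun c => by simp [PySem.Dict.get?_empty])
    (fun c => by simp [PySem.Set.contains])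
    (fun c => by simp) (by simp [pairsSpec])
  rcases h with ⟨⟨c, h3⟩, hres⟩ | ⟨hle, hres⟩
  · have hrep : hasRep A.toList := by
      obtain ⟨p, q, r, h1, h2, h3', e1, e2, e3⟩ := pv_three_positions _ _ h3
      exact ⟨p, q, q, r, h1, h2, h1, h2, h3', e1.trans e2.symm, e2.trans e3.symm⟩
    rw [hres]
    exact ⟨fun _ => rfl, fun h => absurd hrep h⟩
  · rw [hres]
    exact adj_char A.toList hle

-- ===== VERDICT (by name: the statement is the Claim_ definition above) =====
theorem anytwo_spec : Claim_equal_anytwo := by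
  intro A _
  unfold Spec_anytwo
  by_cases h : hasRep A.toList
  · rw [(anytwo_characterisation A).1 h, (anytwo_alt_characterisation A).1 h]
  · rw [(anytwo_characterisation A).2 h, (anytwo_alt_characterisation A).2 h]
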